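-- pv_equiv track=rewrite | github.com/AbrhamYishak/Competitive-Programming- | 03-Feb-2025/Print Words Vertically 236844.py | printVertically
-- ===== SOURCE A (Python) =====
-- from typing import List
--
-- def printVertically(s: str) -> List[str]:
--     arr = s.split()
--     n = 0
--     for i in arr:
--         n = max(n,len(i))
--     ans = []
--     for i in range(n):
--         ele = []
--         for j in arr:
--             if i < len(j):
--                 ele.append(j[i])
--             else:
--                 ele.append(" ")
--         ans.append("".join(ele).rstrip())
--     return ans
-- ===== SOURCE B (Python) =====
-- from typing import List
--
-- def printVertically(s: str) -> List[str]:
--     its = [iter(w) for w in s.split()]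
--     ans = []
--     while True:
--         col = [next(it, None) for it in its]
--         if all(c is None for c in col):
--             return ans
--         ans.append("".join(c if c is not None else " " for c in col).rstrip())
-- ===== Notes on version B (the rewrite author's own statement) =====
-- stated objective: simpler
-- what changed: Replaces the max-length pass and the index loop with its i<len(j) bounds guard by a zip_longest-style transpose: one iterator per word, each round emits the next character of every word (space when exhausted) until all iterators are exhausted.
import Mathlib
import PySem

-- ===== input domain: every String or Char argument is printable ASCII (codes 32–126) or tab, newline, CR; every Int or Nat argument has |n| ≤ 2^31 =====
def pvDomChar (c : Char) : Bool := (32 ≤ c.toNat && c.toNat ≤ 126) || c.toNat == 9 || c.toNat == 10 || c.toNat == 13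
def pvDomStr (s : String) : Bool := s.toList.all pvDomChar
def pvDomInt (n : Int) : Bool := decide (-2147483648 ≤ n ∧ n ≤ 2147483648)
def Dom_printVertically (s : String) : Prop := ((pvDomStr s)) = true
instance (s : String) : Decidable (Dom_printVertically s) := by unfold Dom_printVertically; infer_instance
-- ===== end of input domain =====

-- B replaces A's max-length pass and bounds-checked index loop by a zip_longest-style
-- head-peeling transpose of the words (objective: simpler).

-- ===== PORT A =====
def printVertically (s : String) : List String :=
  let arr := PySem.Str.split₀ s
  let n : Int := arr.foldl (fun n i => max n (PySem.Str.len i)) 0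
  (PySem.List.pyRange 0 n 1).foldl (fun ans i =>
    ans ++ [PySem.Str.rstrip (String.mk (arr.foldl (fun ele j =>
      ele ++ [if i < PySem.Str.len j then (PySem.Str.pyGet? j i).getD ' ' else ' ']) []))]) []

-- ===== PORT B =====
-- termination lemma for B's peeling loop (cited by its decreasing_by)
theorem pvPeel_dec (ws : List (List Char)) (h : ws.any (fun w => !w.isEmpty) = true) :
    ((ws.map (fun w => w.drop 1)).map List.length).sum < (ws.map List.length).sum := by
  induction ws with
  | nil => simp at h
  | cons w ws ih =>
    simp only [List.any_cons, Bool.or_eq_true] at h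
    rcases h with h | h
    · cases w with
      | nil => simp at h
      | cons c w =>
        simp only [List.map_cons, List.sum_cons, List.drop_succ_cons, List.drop_zero,
          List.length_cons]
        have : ((ws.map (fun w => w.drop 1)).map List.length).sum ≤ (ws.map List.length).sum := by
          clear ih
          induction ws with
          | nil => simp
          | cons v vs ih2 =>
            simp only [List.map_cons, List.sum_cons]
            have := List.length_drop (l := v) (i := 1)
            omega
        omega
    · have := ih h
      simp only [List.map_cons, List.sum_cons]
      have := List.length_drop (l := w) (i := 1)
      omega

-- Source B's 'while True' peeling loop; each word iterator's state is its remaining suffix: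
-- next(it, None) is headD / drop 1, and 'all exhausted' is the negated any-nonempty test
def pvPeel (ws : List (List Char)) : List String :=
  if h : ws.any (fun w => !w.isEmpty) = true then
    PySem.Str.rstrip (String.mk (ws.map (fun w => w.headD ' '))) ::
      pvPeel (ws.map (fun w => w.drop 1))
  else []
termination_by (ws.map List.length).sum
decreasing_by simpa using pvPeel_dec ws h

def printVertically_alt (s : String) : List String :=
  pvPeel ((PySem.Str.split₀ s).map String.toList)

-- ===== PRECONDITION & SPEC =====
def Spec_printVertically (s : String) (out : List String) : Prop := out = printVertically_alt s
instance (s : String) (out : List String) : Decidable (Spec_printVertically s out) := by unfold Spec_printVertically; infer_instance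

-- ===== CLAIM (what is proved, stated in full; the proofs are below) =====
def Claim_equal_printVertically : Prop := ∀ (s : String), Dom_printVertically s → Spec_printVertically s (printVertically s)

-- ===== LEMMAS AND PROOFS =====

-- the maximum word length, Nat-valued
def pvMaxLen (ws : List (List Char)) : Nat := ws.foldl (fun n w => max n w.length) 0

theorem pvFoldMax_acc (ws : List (List Char)) (a : Nat) :
    ws.foldl (fun n w => max n w.length) a = max a (pvMaxLen ws) := by
  induction ws generalizing a with
  | nil => simp [pvMaxLen]
  | cons w ws ih =>
    simp only [pvMaxLen, List.foldl_cons] at *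
    rw [ih, ih (max 0 w.length)]
    omega

theorem pvMaxLen_cons (w : List Char) (ws : List (List Char)) :
    pvMaxLen (w :: ws) = max w.length (pvMaxLen ws) := by
  simp only [pvMaxLen, List.foldl_cons]
  rw [pvFoldMax_acc]
  simp only [pvMaxLen]
  omega

theorem pvMaxLen_eq_zero_iff (ws : List (List Char)) :
    pvMaxLen ws = 0 ↔ ws.any (fun w => !w.isEmpty) = false := by
  induction ws with
  | nil => simp [pvMaxLen]
  | cons w ws ih =>
    rw [pvMaxLen_cons]
    simp only [List.any_cons, Bool.or_eq_false_iff, ← ih, Bool.not_eq_false',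
      List.isEmpty_iff_length_eq_zero]
    omega

theorem pvMaxLen_drop (ws : List (List Char)) :
    pvMaxLen (ws.map (fun w => w.drop 1)) = pvMaxLen ws - 1 := by
  induction ws with
  | nil => simp [pvMaxLen]
  | cons w ws ih =>
    simp only [List.map_cons, pvMaxLen_cons, ih, List.length_drop]
    omega

theorem pvDropGetD (w : List Char) (i : Nat) (d : Char) :
    (w.drop 1).getD i d = w.getD (i + 1) d := by
  simp [List.getD]

theorem pvHeadD (w : List Char) (d : Char) : w.headD d = w.getD 0 d := by
  cases w <;> simp [List.getD]

-- the column-major characterisation both ports reduce to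
theorem pvPeel_eq (ws : List (List Char)) :
    pvPeel ws = (List.range (pvMaxLen ws)).map
      (fun i => PySem.Str.rstrip (String.mk (ws.map (fun w => w.getD i ' ')))) := by
  generalize hm : pvMaxLen ws = m
  induction m generalizing ws with
  | zero =>
    rw [pvMaxLen_eq_zero_iff] at hm
    rw [pvPeel, dif_neg (by simp [hm])]
    simp
  | succ k ih =>
    have hany : ws.any (fun w => !w.isEmpty) = true := by
      by_contra h
      rw [Bool.not_eq_true, ← pvMaxLen_eq_zero_iff] at h
      omega
    rw [pvPeel, dif_pos hany,
      ih (ws.map (fun w => w.drop 1)) (by rw [pvMaxLen_drop, hm]; omega),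
      List.range_succ_eq_map]
    simp only [List.map_map, List.map_cons, Function.comp_def, pvDropGetD, pvHeadD]

-- A's Int-valued max fold equals the Nat-valued pvMaxLen
theorem pvFold_max (arr : List String) (a : Nat) :
    arr.foldl (fun n i => max n (PySem.Str.len i)) (a : Int)
      = ((arr.map String.toList).foldl (fun n w => max n w.length) a : Nat) := by
  induction arr generalizing a with
  | nil => simp
  | cons w arr ih =>
    simp only [List.foldl_cons, List.map_cons]
    rw [show max (a : Int) (PySem.Str.len w) = ((max a w.toList.length : Nat) : Int) by
      simp [Nat.cast_max]]
    exact ih _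

-- A's guarded cell equals getD with default ' '
theorem pvCell (j : String) (k : Nat) :
    (if (k : Int) < PySem.Str.len j then (PySem.Str.pyGet? j (k : Int)).getD ' ' else ' ')
      = j.toList.getD k ' ' := by
  have hlen : PySem.Str.len j = (j.toList.length : Int) := by simp
  rw [hlen]
  by_cases hk : k < j.toList.length
  · rw [if_pos (by omega), PySem.Str.pyGet?_natCast]
    simp [List.getD, List.getElem?_eq_getElem hk]
  · rw [if_neg (by omega)]
    simp [List.getD, List.getElem?_eq_none (by omega : j.toList.length ≤ k)]

theorem pvMain (s : String) : printVertically s = printVertically_alt s := by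
  unfold printVertically printVertically_alt
  simp only [PySem.List.foldl_append_singleton_eq_map, List.nil_append]
  have hf := pvFold_max (PySem.Str.split₀ s) 0
  push_cast at hf
  rw [hf, pvPeel_eq]
  have hm : pvMaxLen ((PySem.Str.split₀ s).map String.toList)
      = ((PySem.Str.split₀ s).map String.toList).foldl (fun n w => max n w.length) 0 := rfl
  rw [← hm, PySem.List.pyRange_one]
  simp only [Int.sub_zero, Int.toNat_natCast, List.map_map, Function.comp_def, Int.zero_add]
  refine List.map_congr_left (fun k _ => ?_)
  simp only [List.map_map, Function.comp_def, pvCell]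

-- ===== VERDICT (by name: the statement is the Claim_ definition above) =====
theorem printVertically_spec : Claim_equal_printVertically := by
  intro s _
  unfold Spec_printVertically
  exact pvMain s
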